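-- pv_equiv track=rewrite | github.com/polarisaistudio/company-auto-apply | ai_modules/resume_generator.py | _get_role_specific_focus
-- ===== SOURCE A (Python) =====
-- from typing import Dict, List
--
-- def _get_role_specific_focus(resume: Dict) -> str:
--     """Determine the role focus based on resume template"""
--
--     target_roles = resume.get("target_roles", [])
--
--     if any("AI" in role or "Machine Learning" in role for role in target_roles):
--         return "AI ENGINEER"
--     elif any("Cloud" in role or "DevOps" in role or "SRE" in role for role in target_roles):
--         return "CLOUD ENGINEER"
--     elif any("Data Scientist" in role or "Analytics" in role for role in target_roles):
--         return "DATA SCIENTIST"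
--     else:
--         return "SOFTWARE ENGINEER"
-- ===== SOURCE B (Python) =====
-- def _get_role_specific_focus(resume):
--     """Determine the role focus based on resume template (single-pass flag accumulation)"""
--     has_ai = has_cloud = has_data = False
--     for role in resume.get("target_roles", []):
--         if "AI" in role or "Machine Learning" in role:
--             has_ai = True
--         if "Cloud" in role or "DevOps" in role or "SRE" in role:
--             has_cloud = True
--         if "Data Scientist" in role or "Analytics" in role:
--             has_data = True
--     if has_ai:
--         return "AI ENGINEER"
--     if has_cloud:
--         return "CLOUD ENGINEER"
--     if has_data:
--         return "DATA SCIENTIST"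
--     return "SOFTWARE ENGINEER"
-- ===== Notes on version B (the rewrite author's own statement) =====
-- stated objective: alternative
-- what changed: Replaces A's three separate any() scans over target_roles with one pass that accumulates has_ai/has_cloud/has_data flags and a final priority decision.
import Mathlib
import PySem

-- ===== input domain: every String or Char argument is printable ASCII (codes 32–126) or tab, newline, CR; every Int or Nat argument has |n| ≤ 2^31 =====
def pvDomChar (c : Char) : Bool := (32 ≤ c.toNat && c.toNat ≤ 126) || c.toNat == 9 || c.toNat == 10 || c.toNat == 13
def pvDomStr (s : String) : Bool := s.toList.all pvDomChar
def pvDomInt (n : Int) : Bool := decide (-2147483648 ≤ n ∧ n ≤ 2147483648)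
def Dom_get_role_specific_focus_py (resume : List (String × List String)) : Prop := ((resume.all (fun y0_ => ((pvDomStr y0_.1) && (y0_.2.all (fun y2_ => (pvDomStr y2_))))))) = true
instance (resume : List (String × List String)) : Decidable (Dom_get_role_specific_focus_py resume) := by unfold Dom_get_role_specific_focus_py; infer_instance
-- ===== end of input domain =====

-- ===== PORT A =====
-- A: three successive any() scans in priority order.
def get_role_specific_focus_py (resume : List (String × List String)) : String :=
  let target_roles := PySem.Dict.getD (PySem.Dict.mk resume) "target_roles" []
  if target_roles.any (fun role => PySem.Str.isIn "AI" role || PySem.Str.isIn "Machine Learning" role) then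
    "AI ENGINEER"
  else if target_roles.any (fun role => PySem.Str.isIn "Cloud" role || PySem.Str.isIn "DevOps" role || PySem.Str.isIn "SRE" role) then
    "CLOUD ENGINEER"
  else if target_roles.any (fun role => PySem.Str.isIn "Data Scientist" role || PySem.Str.isIn "Analytics" role) then
    "DATA SCIENTIST"
  else
    "SOFTWARE ENGINEER"

-- ===== PORT B =====
-- B: one pass accumulating three flags, then a single priority decision.
def get_role_specific_focus_py_alt (resume : List (String × List String)) : String :=
  let target_roles := PySem.Dict.getD (PySem.Dict.mk resume) "target_roles" []
  let flags := target_roles.foldl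
    (fun (st : Bool × Bool × Bool) role =>
      (st.1 || (PySem.Str.isIn "AI" role || PySem.Str.isIn "Machine Learning" role),
       st.2.1 || (PySem.Str.isIn "Cloud" role || PySem.Str.isIn "DevOps" role || PySem.Str.isIn "SRE" role),
       st.2.2 || (PySem.Str.isIn "Data Scientist" role || PySem.Str.isIn "Analytics" role)))
    (false, false, false)
  if flags.1 then "AI ENGINEER"
  else if flags.2.1 then "CLOUD ENGINEER"
  else if flags.2.2 then "DATA SCIENTIST"
  else "SOFTWARE ENGINEER"

-- ===== PRECONDITION & SPEC =====
def Spec_get_role_specific_focus_py (resume : List (String × List String)) (out : String) : Prop := out = get_role_specific_focus_py_alt resume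
instance (resume : List (String × List String)) (out : String) : Decidable (Spec_get_role_specific_focus_py resume out) := by unfold Spec_get_role_specific_focus_py; infer_instance

-- ===== CLAIM (what is proved, stated in full; the proofs are below) =====
def Claim_equal_get_role_specific_focus_py : Prop := ∀ (resume : List (String × List String)), Dom_get_role_specific_focus_py resume → Spec_get_role_specific_focus_py resume (get_role_specific_focus_py resume)

-- ===== LEMMAS AND PROOFS =====
theorem foldl_three_flags {α : Type} (p q r : α → Bool) (l : List α) (a b c : Bool) :
    l.foldl (fun (st : Bool × Bool × Bool) x => (st.1 || p x, st.2.1 || q x, st.2.2 || r x)) (a, b, c)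
      = (a || l.any p, b || l.any q, c || l.any r) := by
  induction l generalizing a b c with
  | nil => simp
  | cons h t ih => simp [List.foldl, ih, Bool.or_assoc]

-- ===== VERDICT (by name: the statement is the Claim_ definition above) =====
theorem get_role_specific_focus_py_spec : Claim_equal_get_role_specific_focus_py := by
  intro resume _
  show get_role_specific_focus_py resume = get_role_specific_focus_py_alt resume
  simp only [get_role_specific_focus_py, get_role_specific_focus_py_alt, foldl_three_flags,
    Bool.false_or]
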